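-- pv_equiv track=rewrite | github.com/tuanle277/CineDeepMatch | utils.py | get_top_fea
-- ===== SOURCE A (Python) =====
-- def get_top_fea(interest_features, feature_name):
--   dumax, feamax = 0, None
--
--   for duration, features in interest_features.items():
--     feature = features[feature_name]
--     if duration > dumax:
--       dumax = duration
--       feamax = feature
--
--   return feamax
-- ===== SOURCE B (Python) =====
-- def get_top_fea(interest_features, feature_name):
--     # Sort-then-pick instead of A's accumulating loop: look up the feature for
--     # every entry (so a missing feature_name raises KeyError exactly as in A),
--     # sort the (duration, feature) pairs by duration in descending order —
--     # Python's sort is stable, so the FIRST-seen entry among equal maximal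
--     # durations stays in front, matching A's strict-> tie behaviour — and
--     # return the head's feature if its duration is positive, else None.
--     pairs = [(d, f[feature_name]) for d, f in interest_features.items()]
--     pairs.sort(key=lambda p: p[0], reverse=True)
--     if pairs and pairs[0][0] > 0:
--         return pairs[0][1]
--     return None
-- ===== Notes on version B (the rewrite author's own statement) =====
-- stated objective: alternative
-- what changed: A's single accumulating (dumax, feamax) loop is replaced by sort-then-pick: build the (duration, feature) pairs, stably sort them by duration descending, and read the answer off the head of the sorted list (stability preserves the first-on-ties rule).
import Mathlib
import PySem

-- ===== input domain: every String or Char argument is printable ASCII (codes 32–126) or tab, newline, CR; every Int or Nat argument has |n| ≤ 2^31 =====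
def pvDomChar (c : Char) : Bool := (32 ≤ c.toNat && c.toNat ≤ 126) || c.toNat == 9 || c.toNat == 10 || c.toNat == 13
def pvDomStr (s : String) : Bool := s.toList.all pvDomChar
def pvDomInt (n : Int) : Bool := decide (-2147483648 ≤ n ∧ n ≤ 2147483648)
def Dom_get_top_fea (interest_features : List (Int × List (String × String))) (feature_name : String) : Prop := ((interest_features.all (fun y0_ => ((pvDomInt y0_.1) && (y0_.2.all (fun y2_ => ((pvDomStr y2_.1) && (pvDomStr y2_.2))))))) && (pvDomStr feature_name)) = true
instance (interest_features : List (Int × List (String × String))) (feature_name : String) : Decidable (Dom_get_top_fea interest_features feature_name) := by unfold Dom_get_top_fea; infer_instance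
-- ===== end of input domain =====

-- B replaces A's accumulating (dumax, feamax) loop by sort-descending-then-take-head (objective: alternative).


-- ===== PORT A =====
-- Literal port of A's loop: state (dumax, feamax), feature looked up each iteration.
-- features[feature_name] is ported as Dict.getD with default "": the KeyError case
-- (feature_name absent) is excluded by Pre_get_top_fea.
def get_top_fea (interest_features : List (Int × List (String × String))) (feature_name : String) : Option String :=
  (interest_features.foldl
    (fun (st : Int × Option String) df =>
      let feature := PySem.Dict.getD (PySem.Dict.mk df.2) feature_name ""
      if df.1 > st.1 then (df.1, some feature) else st)
    ((0 : Int), (none : Option String))).2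

-- ===== PORT B =====
-- Literal port of Source B: build the pairs, stable-sort by duration descending
-- (PySem.List.sorted with reverse := true is Python's stable sort), then look at the head.
def get_top_fea_alt (interest_features : List (Int × List (String × String))) (feature_name : String) : Option String :=
  let pairs := interest_features.map (fun df => (df.1, PySem.Dict.getD (PySem.Dict.mk df.2) feature_name ""))
  let s := PySem.List.sorted pairs (fun p => p.1) true
  match s.head? with
  | some q => if q.1 > 0 then some q.2 else none
  | none => none

-- ===== PRECONDITION & SPEC =====
-- Pre_ excludes (a) entries whose feature dict lacks feature_name, on which A raises KeyError,
-- and (b) duplicate outer or inner keys: the Python arguments are dicts, which cannot hold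
-- duplicate keys, so no Python input is lost.
def Pre_get_top_fea (interest_features : List (Int × List (String × String))) (feature_name : String) : Prop :=
  (interest_features.map (fun p => p.1)).Nodup ∧
  ∀ p ∈ interest_features, (p.2.map (fun q => q.1)).Nodup ∧ feature_name ∈ p.2.map (fun q => q.1)
instance (interest_features : List (Int × List (String × String))) (feature_name : String) : Decidable (Pre_get_top_fea interest_features feature_name) := by unfold Pre_get_top_fea; infer_instance
def pvWitness_get_top_fea : (List (Int × List (String × String))) × String := ([(3, [("f", "x")]), (-1, [("f", "y")])], "f")

def Spec_get_top_fea (interest_features : List (Int × List (String × String))) (feature_name : String) (out : Option String) : Prop := out = get_top_fea_alt interest_features feature_name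
instance (interest_features : List (Int × List (String × String))) (feature_name : String) (out : Option String) : Decidable (Spec_get_top_fea interest_features feature_name out) := by unfold Spec_get_top_fea; infer_instance

-- ===== CLAIM (what is proved, stated in full; the proofs are below) =====
def Claim_equal_get_top_fea : Prop := ∀ (interest_features : List (Int × List (String × String))) (feature_name : String), Dom_get_top_fea interest_features feature_name → Pre_get_top_fea interest_features feature_name → Spec_get_top_fea interest_features feature_name (get_top_fea interest_features feature_name)

-- ===== LEMMAS AND PROOFS =====

-- A's loop step on a precomputed (duration, feature) pair.
def pvStepA (st : Int × Option String) (p : Int × String) : Int × Option String :=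
  if p.1 > st.1 then (p.1, some p.2) else st

-- First-seen-maximum step (no threshold): keep the current best unless strictly beaten.
def pvStepM (acc : Option (Int × String)) (p : Int × String) : Option (Int × String) :=
  match acc with
  | none => some p
  | some m => if m.1 < p.1 then some p else some m

-- The head of a stable descending insertion keeps the first-seen maximum.
theorem pvHead_insertBy (x : Int × String) (ys : List (Int × String)) :
    (PySem.List.insertBy (fun a b => decide ((fun p : Int × String => p.1) b < (fun p : Int × String => p.1) a)) x ys).head?
      = pvStepM ys.head? x := by
  cases ys with
  | nil => rfl
  | cons m t =>
    simp only [PySem.List.insertBy, pvStepM, List.head?_cons]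
    by_cases h : m.1 < x.1
    · simp [h]
    · simp [h]

-- Folding stable descending insertion, the head tracks the first-seen maximum.
theorem pvHead_foldl (ps : List (Int × String)) (acc : List (Int × String)) :
    (ps.foldl (fun a x => PySem.List.insertBy (fun a b => decide ((fun p : Int × String => p.1) b < (fun p : Int × String => p.1) a)) x a) acc).head?
      = ps.foldl pvStepM acc.head? := by
  induction ps generalizing acc with
  | nil => rfl
  | cons p t ih =>
    simp only [List.foldl_cons]
    rw [ih, pvHead_insertBy]

-- The invariant tying A's running (dumax, feamax) state to the first-seen maximum.
def pvInv (st : Int × Option String) (acc : Option (Int × String)) : Prop :=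
  match acc with
  | none => st = (0, none)
  | some q => if q.1 > 0 then st = (q.1, some q.2) else st = (0, none)

theorem pvInv_fold (ps : List (Int × String)) (st : Int × Option String)
    (acc : Option (Int × String)) (h : pvInv st acc) :
    pvInv (ps.foldl pvStepA st) (ps.foldl pvStepM acc) := by
  induction ps generalizing st acc with
  | nil => exact h
  | cons p t ih =>
    simp only [List.foldl_cons]
    apply ih
    cases acc with
    | none =>
      simp only [pvInv] at h
      subst h
      simp only [pvStepA, pvStepM, pvInv]
      by_cases hp : p.1 > 0
      · simp [hp]
      · have : ¬ p.1 > (0 : Int) := hp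
        simp [this]
    | some q =>
      simp only [pvInv] at h
      by_cases hq : q.1 > 0
      · rw [if_pos hq] at h
        subst h
        simp only [pvStepA, pvStepM, pvInv]
        by_cases hc : q.1 < p.1
        · have hp : p.1 > 0 := lt_trans hq hc
          simp [hc, hp]
        · have : ¬ p.1 > q.1 := hc
          simp [hc, hq]
      · rw [if_neg hq] at h
        subst h
        simp only [pvStepA, pvStepM, pvInv]
        by_cases hc : q.1 < p.1
        · by_cases hp : p.1 > 0
          · simp [hc, hp]
          · have : ¬ p.1 > (0 : Int) := hp
            simp [hc, this]
        · have hp : ¬ p.1 > (0 : Int) := by omega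
          simp [hc, hp, hq]

-- ===== VERDICT (by name: the statement is the Claim_ definition above) =====
theorem get_top_fea_spec : Claim_equal_get_top_fea := by
  intro ifs fn _ _
  unfold Spec_get_top_fea get_top_fea get_top_fea_alt
  have hA : (ifs.foldl
      (fun (st : Int × Option String) df =>
        let feature := PySem.Dict.getD (PySem.Dict.mk df.2) fn ""
        if df.1 > st.1 then (df.1, some feature) else st)
      ((0 : Int), (none : Option String)))
      = ((ifs.map (fun df => (df.1, PySem.Dict.getD (PySem.Dict.mk df.2) fn ""))).foldl
          pvStepA ((0 : Int), (none : Option String))) := by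
    rw [List.foldl_map]
    rfl
  rw [hA]
  set ps := ifs.map (fun df => (df.1, PySem.Dict.getD (PySem.Dict.mk df.2) fn "")) with hps
  have hsort : (PySem.List.sorted ps (fun p => p.1) true).head? = ps.foldl pvStepM none := by
    rw [PySem.List.sorted_rev_eq_foldl_insertBy]
    exact pvHead_foldl ps []
  have hinv := pvInv_fold ps ((0 : Int), (none : Option String)) none rfl
  simp only [hsort]
  cases hM : ps.foldl pvStepM none with
  | none =>
    rw [hM] at hinv
    simp only [pvInv] at hinv
    rw [hinv]
  | some q =>
    rw [hM] at hinv
    simp only [pvInv] at hinv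
    by_cases hq : q.1 > 0
    · rw [if_pos hq] at hinv
      rw [hinv]
      simp [hq]
    · rw [if_neg hq] at hinv
      rw [hinv]
      simp [hq]
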